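-- pv_equiv track=rewrite | github.com/umair1422/Text-generation | test_text.py | next_following_Words
-- ===== SOURCE A (Python) =====
-- def next_following_Words(input_Word, final_list):
--     # Create an empty list to store the indices of all occurrences of the input word in the final list.
--     find_matching_Indexes = []
--     i = 0
--     # Iterate through the list and find all occurrences of the input word, and store their indices in the list.
--     while i < len(final_list):
--         if final_list[i] == input_Word:
--             find_matching_Indexes.append(i)
--         i += 1
--     # Create an empty list to store the indices of the words immediately following the input word.
--     find_matching_Indexes_next = []
--     i = 0
--     # Iterate through the list of indices of the input word, and add 1 to each index to get the index of the following word.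
--     while i < len(find_matching_Indexes):
--         find_matching_Indexes_next.append(find_matching_Indexes[i] + 1)
--         i += 1
--     # Create a list of the following words by using the indices of the following words.
--     next_words = [final_list[i] for i in find_matching_Indexes_next]
--     # Return the list of following words.
--     return next_words
-- ===== SOURCE B (Python) =====
-- def next_following_Words(input_Word, final_list):
--     # Pairwise traversal: zip the list with its own tail so each element is seen
--     # next to its successor; no index arithmetic, no index tables.
--     return [nxt for prev, nxt in zip(final_list, final_list[1:]) if prev == input_Word]
-- ===== Notes on version B (the rewrite author's own statement) =====
-- stated objective: simpler
-- what changed: B zips the list with its own tail and filters adjacent (prev, next) pairs, eliminating all indexing and A's three staged index tables; on a match at the last position A raises IndexError (excluded by Pre_) while B, having no successor pair there, simply omits it.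
import Mathlib
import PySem

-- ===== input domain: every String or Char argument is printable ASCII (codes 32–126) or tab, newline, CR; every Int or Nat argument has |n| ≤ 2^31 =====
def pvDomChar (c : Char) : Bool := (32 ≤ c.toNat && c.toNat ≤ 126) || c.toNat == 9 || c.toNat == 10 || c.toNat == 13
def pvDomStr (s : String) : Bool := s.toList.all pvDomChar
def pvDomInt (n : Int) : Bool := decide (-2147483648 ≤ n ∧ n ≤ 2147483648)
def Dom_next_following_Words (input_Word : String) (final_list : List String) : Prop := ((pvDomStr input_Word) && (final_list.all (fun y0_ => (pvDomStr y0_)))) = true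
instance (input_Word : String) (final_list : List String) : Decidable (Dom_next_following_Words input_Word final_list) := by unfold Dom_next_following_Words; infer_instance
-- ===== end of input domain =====

-- B zips the list with its own tail and filters the adjacent (prev, next) pairs, with no
-- indexing at all, replacing A's three staged index tables (objective: simpler).

-- ===== PORT A =====
def next_following_Words (input_Word : String) (final_list : List String) : List String :=
  -- loop 1: collect indices of occurrences of input_Word
  let find_matching_Indexes : List Int :=
    (PySem.List.pyRange 0 (PySem.List.len final_list) 1).foldl
      (fun acc i => if PySem.List.pyGetD final_list i "" = input_Word then acc ++ [i] else acc) []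
  -- loop 2: add 1 to each stored index
  let find_matching_Indexes_next : List Int :=
    find_matching_Indexes.foldl (fun acc j => acc ++ [j + 1]) []
  -- comprehension: look each offset index up (pyGetD: in range under Pre_)
  find_matching_Indexes_next.map (fun i => PySem.List.pyGetD final_list i "")

-- ===== PORT B =====
def next_following_Words_alt (input_Word : String) (final_list : List String) : List String :=
  -- zip(final_list, final_list[1:]) filtered on the first component (the comprehension)
  (final_list.zip (PySem.List.slice final_list (some 1) none)).filterMap
    (fun p => if p.1 = input_Word then some p.2 else none)

-- ===== PRECONDITION & SPEC =====
-- Pre_ excludes exactly the inputs where Python A raises IndexError: a match at the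
-- last position of the list (then final_list[last+1] is out of range).
def Pre_next_following_Words (input_Word : String) (final_list : List String) : Prop :=
  final_list.getLast? ≠ some input_Word
instance (input_Word : String) (final_list : List String) : Decidable (Pre_next_following_Words input_Word final_list) := by unfold Pre_next_following_Words; infer_instance
def pvWitness_next_following_Words : String × List String := ("a", ["a", "b", "a", "c"])

def Spec_next_following_Words (input_Word : String) (final_list : List String) (out : List String) : Prop := out = next_following_Words_alt input_Word final_list
instance (input_Word : String) (final_list : List String) (out : List String) : Decidable (Spec_next_following_Words input_Word final_list out) := by unfold Spec_next_following_Words; infer_instance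

-- ===== CLAIM (what is proved, stated in full; the proofs are below) =====
def Claim_equal_next_following_Words : Prop := ∀ (input_Word : String) (final_list : List String), Dom_next_following_Words input_Word final_list → Pre_next_following_Words input_Word final_list → Spec_next_following_Words input_Word final_list (next_following_Words input_Word final_list)

-- ===== LEMMAS AND PROOFS =====

-- A reduces to a filter-then-map over range(len(final_list)).
theorem next_following_Words_eq_canon (w : String) (fl : List String) :
    next_following_Words w fl =
      ((PySem.List.pyRange 0 (PySem.List.len fl) 1).filter
          (fun i => PySem.List.pyGetD fl i "" = w)).map
        (fun i => PySem.List.pyGetD fl (i + 1) "") := by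
  unfold next_following_Words
  simp only [PySem.List.foldl_append_ite_eq_filter, PySem.List.foldl_append_singleton_eq_map,
    List.nil_append, List.map_map, Function.comp_def]

-- Nat-level version of A's result (proof-only helper).
def canonA (w : String) (fl : List String) : List String :=
  ((List.range fl.length).filter (fun i => fl.getD i "" = w)).map
    (fun i => fl.getD (i + 1) "")

-- Pairwise recursion both sides reduce to (proof-only helper).
def follow (w : String) : List String → List String
  | a :: b :: t => if a = w then b :: follow w (b :: t) else follow w (b :: t)
  | _ => []

theorem canonA_cons (w a : String) (t : List String) :
    canonA w (a :: t) = if a = w then t.getD 0 "" :: canonA w t else canonA w t := by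
  unfold canonA
  simp only [List.length_cons, List.range_succ_eq_map, List.filter_cons,
    List.filter_map, Function.comp_def, List.getD_cons_succ,
    List.getD_cons_zero]
  by_cases ha : a = w <;> simp [ha]

theorem canonA_eq_follow (w : String) :
    ∀ (fl : List String), fl.getLast? ≠ some w → canonA w fl = follow w fl := by
  intro fl
  induction fl with
  | nil => intro _; rfl
  | cons a t ih =>
    intro hlast
    cases t with
    | nil =>
      have ha : a ≠ w := by simpa using hlast
      simp [ha, canonA, follow]
    | cons b t' =>
      have ht : (b :: t').getLast? ≠ some w := by
        simpa [List.getLast?_cons_cons] using hlast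
      rw [canonA_cons, ih ht]
      by_cases ha : a = w <;> simp [ha, follow]

theorem zip_eq_follow (w : String) :
    ∀ (fl : List String),
      (fl.zip fl.tail).filterMap (fun p => if p.1 = w then some p.2 else none)
        = follow w fl := by
  intro fl
  induction fl with
  | nil => rfl
  | cons a t ih =>
    cases t with
    | nil => rfl
    | cons b t' =>
      simp only [List.tail_cons, List.zip_cons_cons, List.filterMap_cons] at *
      by_cases ha : a = w <;> simp [ha, follow, ih]

theorem next_following_Words_spec : Claim_equal_next_following_Words := by
  intro w fl _ hpre
  unfold Spec_next_following_Words
  rw [next_following_Words_eq_canon]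
  unfold next_following_Words_alt
  rw [PySem.List.slice_from_one, zip_eq_follow, ← canonA_eq_follow w fl hpre]
  have hcast : ∀ (x : Nat), ((x : Int) + 1) = (((x + 1 : Nat) : Int)) := by
    intro x; push_cast; ring
  unfold canonA
  simp only [PySem.List.len_eq, PySem.List.pyRange_zero_nat, List.filter_map,
    List.map_map, Function.comp_def, hcast, PySem.List.pyGetD_natCast]
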